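-- pv_equiv track=rewrite | github.com/ethan010101/RocomWikiAgent | backend/rag_pipeline/dialogue_budget.py | trim_lines
-- ===== SOURCE A (Python) =====
-- def trim_lines(lines: list[str], max_chars: int) -> list[str]:
--     if max_chars <= 0:
--         return lines
--     kept: list[str] = []
--     used = 0
--     for line in reversed(lines):
--         n = len(line) + 1
--         if kept and used + n > max_chars:
--             break
--         if not kept and n > max_chars:
--             kept.append(line[: max(max_chars - 1, 1)] + "…")
--             break
--         kept.append(line)
--         used += n
--     kept.reverse()
--     return kept
-- ===== SOURCE B (Python) =====
-- def trim_lines(lines: list[str], max_chars: int) -> list[str]: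
--     if max_chars <= 0:
--         return lines
--     total = sum(len(l) + 1 for l in lines)
--     i = 0
--     while total > max_chars:
--         total -= len(lines[i]) + 1
--         i += 1
--     kept = lines[i:]
--     if not kept and lines:
--         kept = [lines[-1][: max(max_chars - 1, 1)] + "…"]
--     return kept
-- ===== Notes on version B (the rewrite author's own statement) =====
-- stated objective: alternative
-- what changed: Instead of accumulating lines backwards with a used-budget counter and break conditions, B sums all line lengths once and advances a front index while the remaining total exceeds the budget, taking the list suffix from there; the single-line truncation falls out as the empty-suffix case.
import Mathlib
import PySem

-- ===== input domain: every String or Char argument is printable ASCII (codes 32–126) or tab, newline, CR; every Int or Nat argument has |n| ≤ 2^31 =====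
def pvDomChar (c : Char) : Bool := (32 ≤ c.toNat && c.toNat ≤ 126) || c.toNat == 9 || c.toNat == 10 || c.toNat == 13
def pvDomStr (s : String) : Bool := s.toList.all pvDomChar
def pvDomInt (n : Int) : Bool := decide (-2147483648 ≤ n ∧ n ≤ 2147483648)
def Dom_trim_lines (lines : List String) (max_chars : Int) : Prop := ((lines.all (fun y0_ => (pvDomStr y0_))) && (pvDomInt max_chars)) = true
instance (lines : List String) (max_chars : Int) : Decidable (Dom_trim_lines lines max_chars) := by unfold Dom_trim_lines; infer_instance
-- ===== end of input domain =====

-- B replaces A's backward accumulate-while-it-fits loop with a one-pass total and a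
-- forward index that drops lines while the remaining total exceeds the budget (alternative decomposition, same cost).

-- ===== PORT A =====
-- the for-loop over reversed(lines) with `kept`/`used` state and its two break conditions
def trimLoopA (max_chars : Int) : List String → List String → Int → List String
  | [], kept, _ => kept
  | line :: rest, kept, used =>
    let n : Int := (PySem.Str.len line : Int) + 1
    if kept ≠ [] ∧ used + n > max_chars then kept
    else if kept = [] ∧ n > max_chars then
      kept ++ [PySem.Str.slice line none (some (max (max_chars - 1) 1)) ++ "…"]
    else trimLoopA max_chars rest (kept ++ [line]) (used + n)

def trim_lines (lines : List String) (max_chars : Int) : List String :=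
  if max_chars ≤ 0 then lines
  else (trimLoopA max_chars lines.reverse [] 0).reverse

-- ===== PORT B =====
-- the `while total > max_chars` loop advancing the front index (lines[i:] is the list not yet dropped);
-- the [] arm is the exhausted list, where Python's loop guard (total = 0 ≤ max_chars) has already stopped
def trimDropB (max_chars : Int) : Int → List String → List String
  | _, [] => []
  | total, l :: rest =>
    if total > max_chars then trimDropB max_chars (total - ((PySem.Str.len l : Int) + 1)) rest
    else l :: rest

def trim_lines_alt (lines : List String) (max_chars : Int) : List String :=
  if max_chars ≤ 0 then lines
  else
    let total : Int := lines.foldl (fun a l => a + ((PySem.Str.len l : Int) + 1)) 0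
    let kept := trimDropB max_chars total lines
    if kept = [] ∧ lines ≠ [] then
      [PySem.Str.slice (PySem.List.pyGetD lines (-1) "") none (some (max (max_chars - 1) 1)) ++ "…"]
    else kept

-- ===== PRECONDITION & SPEC =====
def Spec_trim_lines (lines : List String) (max_chars : Int) (out : List String) : Prop := out = trim_lines_alt lines max_chars
instance (lines : List String) (max_chars : Int) (out : List String) : Decidable (Spec_trim_lines lines max_chars out) := by unfold Spec_trim_lines; infer_instance

-- ===== CLAIM (what is proved, stated in full; the proofs are below) =====
def Claim_equal_trim_lines : Prop := ∀ (lines : List String) (max_chars : Int), Dom_trim_lines lines max_chars → Spec_trim_lines lines max_chars (trim_lines lines max_chars)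

-- ===== LEMMAS AND PROOFS =====

-- total weight of a list of lines: Σ (len + 1)
def sumW : List String → Int
  | [] => 0
  | l :: rest => ((PySem.Str.len l : Int) + 1) + sumW rest

-- greedy prefix that fits into the budget starting from `used` (what A's loop appends once kept ≠ [])
def pfx (max_chars : Int) : List String → Int → List String
  | [], _ => []
  | l :: rest, used =>
    if used + ((PySem.Str.len l : Int) + 1) ≤ max_chars then
      l :: pfx max_chars rest (used + ((PySem.Str.len l : Int) + 1))
    else []

theorem lenW_nonneg (l : String) : 0 ≤ (PySem.Str.len l : Int) := by
  simp [PySem.Str.len_eq]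

theorem sumW_nonneg (ls : List String) : 0 ≤ sumW ls := by
  induction ls with
  | nil => simp [sumW]
  | cons l rest ih => have := lenW_nonneg l; simp only [sumW]; omega

theorem sumW_append (a b : List String) : sumW (a ++ b) = sumW a + sumW b := by
  induction a with
  | nil => simp [sumW]
  | cons l rest ih => simp only [List.cons_append, sumW, ih]; omega

theorem sumW_reverse (ls : List String) : sumW ls.reverse = sumW ls := by
  induction ls with
  | nil => rfl
  | cons l rest ih => rw [List.reverse_cons, sumW_append, ih]; simp only [sumW]; omega

theorem foldl_sumW (ls : List String) (a : Int) :
    ls.foldl (fun a l => a + ((PySem.Str.len l : Int) + 1)) a = a + sumW ls := by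
  induction ls generalizing a with
  | nil => simp [sumW]
  | cons l rest ih => simp only [List.foldl_cons, sumW, ih]; omega

theorem loopA_ne (mc : Int) (r : List String) : ∀ (kept : List String) (used : Int), kept ≠ [] →
    trimLoopA mc r kept used = kept ++ pfx mc r used := by
  induction r with
  | nil => intro kept used h; simp [trimLoopA, pfx]
  | cons l rest ih =>
    intro kept used h
    simp only [trimLoopA, pfx]
    by_cases hfit : used + ((PySem.Str.len l : Int) + 1) ≤ mc
    · rw [if_neg (by rintro ⟨-, hc⟩; omega), if_neg (by simp [h]), if_pos hfit,
        ih _ _ (by simp)]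
      simp
    · rw [if_pos ⟨h, by omega⟩, if_neg hfit]
      simp

theorem pfx_full (mc : Int) (r : List String) (used : Int) (h : used + sumW r ≤ mc) :
    pfx mc r used = r := by
  induction r generalizing used with
  | nil => simp [pfx]
  | cons l rest ih =>
    have h1 := sumW_nonneg rest
    simp only [sumW] at h
    simp only [pfx]
    rw [if_pos (by omega), ih _ (by omega)]

theorem pfx_append_over (mc : Int) (l : String) (r : List String) : ∀ (used : Int),
    used + sumW r + ((PySem.Str.len l : Int) + 1) > mc →
    pfx mc (r ++ [l]) used = pfx mc r used := by
  induction r with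
  | nil =>
    intro used h
    simp only [sumW] at h
    simp only [List.nil_append, pfx]
    rw [if_neg (by omega)]
  | cons a rest ih =>
    intro used h
    simp only [sumW] at h
    simp only [List.cons_append, pfx]
    by_cases hfit : used + ((PySem.Str.len a : Int) + 1) ≤ mc
    · rw [if_pos hfit, if_pos hfit, ih _ (by omega)]
    · rw [if_neg hfit, if_neg hfit]

theorem dropB_eq (mc : Int) (ls : List String) :
    trimDropB mc (sumW ls) ls = (pfx mc ls.reverse 0).reverse := by
  induction ls with
  | nil => simp [trimDropB, pfx]
  | cons l rest ih =>
    simp only [trimDropB, List.reverse_cons]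
    by_cases hover : sumW (l :: rest) > mc
    · rw [if_pos hover]
      have h2 : sumW (l :: rest) - ((PySem.Str.len l : Int) + 1) = sumW rest := by
        simp only [sumW]; omega
      rw [h2, ih, pfx_append_over mc l rest.reverse 0
        (by have := sumW_reverse rest; simp only [sumW] at hover; omega)]
    · rw [if_neg hover,
        pfx_full mc _ 0 (by rw [sumW_append, sumW_reverse]; simp only [sumW] at hover ⊢; omega)]
      simp

theorem ports_eq (lines : List String) (mc : Int) :
    trim_lines lines mc = trim_lines_alt lines mc := by
  by_cases hmc : mc ≤ 0
  · simp [trim_lines, trim_lines_alt, hmc]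
  · simp only [trim_lines, trim_lines_alt, if_neg hmc]
    rw [foldl_sumW, Int.zero_add, dropB_eq]
    cases hrev : lines.reverse with
    | nil =>
      have hl : lines = [] := by simpa using congrArg List.reverse hrev
      subst hl
      simp [trimLoopA, pfx]
    | cons l r =>
      have hl : lines = r.reverse ++ [l] := by simpa using congrArg List.reverse hrev
      have hne : lines ≠ [] := by rw [hl]; simp
      have hlast : PySem.List.pyGetD lines (-1) "" = l := by
        rw [hl]; exact PySem.List.pyGetD_neg_one_append_singleton r.reverse l ""
      by_cases hbig : (PySem.Str.len l : Int) + 1 > mc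
      · have hA : trimLoopA mc (l :: r) [] 0
            = [PySem.Str.slice l none (some (max (mc - 1) 1)) ++ "…"] := by
          simp only [trimLoopA]
          rw [if_neg (by intro h; simpa using h.1)]
          rw [if_pos (by exact ⟨by simp, hbig⟩)]
          simp
        have hp : pfx mc (l :: r) 0 = [] := by
          simp only [pfx]
          rw [if_neg (by omega)]
        rw [hA, hp, if_pos ⟨by simp, hne⟩, hlast]
        simp
      · have hp : pfx mc (l :: r) 0 = l :: pfx mc r (0 + ((PySem.Str.len l : Int) + 1)) := by
          simp only [pfx]
          rw [if_pos (by omega)]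
        have hA : trimLoopA mc (l :: r) [] 0
            = [l] ++ pfx mc r (0 + ((PySem.Str.len l : Int) + 1)) := by
          simp only [trimLoopA]
          rw [if_neg (by intro h; simpa using h.1)]
          rw [if_neg (by intro h; exact absurd h.2 (by omega))]
          rw [loopA_ne mc r ([] ++ [l]) _ (by simp)]
          simp
        rw [hA, hp, if_neg (by rintro ⟨hc, -⟩; simp at hc)]
        simp

-- ===== VERDICT (by name: the statement is the Claim_ definition above) =====
theorem trim_lines_spec : Claim_equal_trim_lines := by
  intro lines mc _
  unfold Spec_trim_lines
  exact ports_eq lines mc
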